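-- pv_equiv track=rewrite | github.com/fvbakel/brilliant | hello_maze/test/try_out.py | reduce_path
-- ===== SOURCE A (Python) =====
-- def reduce_path(path:list):
--     pos_map = dict()
--     for index,pos in enumerate(path):
--         if pos in pos_map:
--             pos_map[pos].append(index)
--         else:
--             pos_map[pos] = [index]
--
--     if len(pos_map) > 0 :
--         cut_start = None
--         cut_end = None
--         cut_diff = 0
--         for pos, index_list in pos_map.items():
--             diff = index_list[-1] - index_list[0]
--             if diff > cut_diff:
--                 cut_diff = diff
--                 cut_start = index_list[0]
--                 cut_end =  index_list[-1]
--
--         if not cut_start is None and not cut_end is None: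
--             return path[:cut_start] + path[cut_end:]
-- ===== SOURCE B (Python) =====
-- def reduce_path(path: list):
--     # Single pass: remember each position's first index; track the widest
--     # first..current repeat span seen so far (strict improvement only).
--     first = {}
--     cut_start = None
--     cut_end = None
--     cut_diff = 0
--     for i, pos in enumerate(path):
--         f = first.get(pos)
--         if f is None:
--             first[pos] = i
--         else:
--             diff = i - f
--             if diff > cut_diff:
--                 cut_diff = diff
--                 cut_start = f
--                 cut_end = i
--     if cut_start is not None and cut_end is not None:
--         return path[:cut_start] + path[cut_end:]
--     return None
-- ===== Notes on version B (the rewrite author's own statement) =====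
-- stated objective: simpler
-- what changed: Replaces A's two phases (build a dict of full per-position index lists, then scan those lists for the widest first-to-last span) by a single fused pass over the path that stores only each position's first index and maintains the running best cut, eliminating the per-position index lists.
import Mathlib
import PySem

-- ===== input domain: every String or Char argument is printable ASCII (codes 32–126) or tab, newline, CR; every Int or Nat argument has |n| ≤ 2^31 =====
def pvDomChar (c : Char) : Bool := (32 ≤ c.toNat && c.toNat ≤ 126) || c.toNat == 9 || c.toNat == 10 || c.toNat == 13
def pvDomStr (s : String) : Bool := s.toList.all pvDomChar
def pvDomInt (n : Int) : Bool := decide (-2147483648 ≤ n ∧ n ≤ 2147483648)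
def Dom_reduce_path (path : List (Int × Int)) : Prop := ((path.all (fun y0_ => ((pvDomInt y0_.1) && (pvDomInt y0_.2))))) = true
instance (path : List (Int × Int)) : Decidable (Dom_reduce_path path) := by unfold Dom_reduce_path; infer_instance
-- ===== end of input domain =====

-- B fuses A's two phases (dict of full per-position index lists, then a scan of those lists)
-- into one pass that keeps only each position's first index and the running best cut.

-- ===== PORT A =====
-- The index lists stored in pos_map are always nonempty, so the `.getD 0` default after
-- pyGet? (Python's l[0] / l[-1], which would raise only on an empty list) is unreachable.
def reduce_path (path : List (Int × Int)) : Option (List (Int × Int)) :=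
  let pos_map : PySem.Dict (Int × Int) (List Int) :=
    (PySem.List.enumerate path).foldl
      (fun m ip => if m.contains ip.2 then m.modify ip.2 [] (· ++ [ip.1]) else m.insert ip.2 [ip.1])
      PySem.Dict.empty
  if 0 < pos_map.size then
    let st := pos_map.items.foldl
      (fun (st : Option Int × Option Int × Int) kv =>
        let diff := (PySem.List.pyGet? kv.2 (-1)).getD 0 - (PySem.List.pyGet? kv.2 0).getD 0
        if st.2.2 < diff then (PySem.List.pyGet? kv.2 0, PySem.List.pyGet? kv.2 (-1), diff) else st)
      (none, none, 0)
    match st.1, st.2.1 with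
    | some cs, some ce =>
        some (PySem.List.slice path none (some cs) ++ PySem.List.slice path (some ce) none)
    | _, _ => none
  else none

-- ===== PORT B =====
def reduce_path_alt (path : List (Int × Int)) : Option (List (Int × Int)) :=
  let r := (PySem.List.enumerate path).foldl
    (fun (acc : PySem.Dict (Int × Int) Int × Option Int × Option Int × Int) ip =>
      match acc.1.get? ip.2 with
      | none => (acc.1.insert ip.2 ip.1, acc.2)
      | some f => if acc.2.2.2 < ip.1 - f then (acc.1, some f, some ip.1, ip.1 - f) else acc)
    (PySem.Dict.empty, none, none, 0)
  match r.2.1 with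
  | some cs =>
    match r.2.2.1 with
    | some ce =>
        some (PySem.List.slice path none (some cs) ++ PySem.List.slice path (some ce) none)
    | none => none
  | none => none

-- ===== PRECONDITION & SPEC =====
def Spec_reduce_path (path : List (Int × Int)) (out : Option (List (Int × Int))) : Prop := out = reduce_path_alt path
instance (path : List (Int × Int)) (out : Option (List (Int × Int))) : Decidable (Spec_reduce_path path out) := by unfold Spec_reduce_path; infer_instance

-- ===== CLAIM (what is proved, stated in full; the proofs are below) =====
def Claim_equal_reduce_path : Prop := ∀ (path : List (Int × Int)), Dom_reduce_path path → Spec_reduce_path path (reduce_path path)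

-- ===== LEMMAS AND PROOFS =====

-- The common "strict improvement" step both loops perform on a (first, last) pair.
def dstep (st : Option Int × Option Int × Int) (x : Int × Int) : Option Int × Option Int × Int :=
  if st.2.2 < x.2 - x.1 then (some x.1, some x.2, x.2 - x.1) else st

def dmax (d : Int) (L : List (Int × Int)) : Int := L.foldl (fun m x => max m (x.2 - x.1)) d

theorem le_dmax (d : Int) (L : List (Int × Int)) : d ≤ dmax d L := by
  induction L generalizing d with
  | nil => simp [dmax]
  | cons x t ih => exact le_trans (le_max_left d (x.2 - x.1)) (ih (max d (x.2 - x.1)))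

theorem diff_le_dmax (d : Int) {L : List (Int × Int)} {x : Int × Int} (hx : x ∈ L) :
    x.2 - x.1 ≤ dmax d L := by
  induction L generalizing d with
  | nil => cases hx
  | cons y t ih =>
    rcases List.mem_cons.mp hx with h | h
    · subst h; exact le_trans (le_max_right d (x.2 - x.1)) (le_dmax _ t)
    · exact ih (max d (y.2 - y.1)) h

theorem dmax_eq_of_forall {d : Int} {L : List (Int × Int)} (h : ∀ x ∈ L, x.2 - x.1 ≤ d) :
    dmax d L = d := by
  induction L generalizing d with
  | nil => rfl
  | cons x t ih =>
    show dmax (max d (x.2 - x.1)) t = d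
    rw [max_eq_left (h x (by simp))]
    exact ih (fun y hy => h y (by simp [hy]))

theorem dmax_eq_or (d : Int) (L : List (Int × Int)) :
    dmax d L = d ∨ ∃ x ∈ L, dmax d L = x.2 - x.1 := by
  induction L generalizing d with
  | nil => exact Or.inl rfl
  | cons x t ih =>
    rcases ih (max d (x.2 - x.1)) with h | ⟨y, hy, h⟩
    · show dmax d (x :: t) = d ∨ _
      have hx : dmax d (x :: t) = max d (x.2 - x.1) := h
      rcases max_cases d (x.2 - x.1) with ⟨h1, _⟩ | ⟨h1, _⟩
      · exact Or.inl (by rw [hx, h1])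
      · exact Or.inr ⟨x, by simp, by rw [hx, h1]⟩
    · exact Or.inr ⟨y, by simp [hy], h⟩

theorem foldl_dstep_char (L : List (Int × Int)) (s e : Option Int) (d : Int) :
    L.foldl dstep (s, e, d) =
      if ∀ x ∈ L, x.2 - x.1 ≤ d then (s, e, d)
      else
        match L.find? (fun x => decide (x.2 - x.1 = dmax d L)) with
        | some y => (some y.1, some y.2, y.2 - y.1)
        | none => (s, e, d) := by
  induction L generalizing s e d with
  | nil => simp
  | cons x t ih =>
    by_cases hall : ∀ y ∈ x :: t, y.2 - y.1 ≤ d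
    · have hx : x.2 - x.1 ≤ d := hall x (by simp)
      have hts : ∀ y ∈ t, y.2 - y.1 ≤ d := fun y hy => hall y (by simp [hy])
      rw [if_pos hall, List.foldl_cons,
        show dstep (s, e, d) x = (s, e, d) from by simp [dstep, not_lt.mpr hx],
        ih s e d, if_pos hts]
    · rw [if_neg hall, List.foldl_cons]
      by_cases hx : d < x.2 - x.1
      · rw [show dstep (s, e, d) x = (some x.1, some x.2, x.2 - x.1) from by simp [dstep, hx]]
        rw [ih (some x.1) (some x.2) (x.2 - x.1)]
        have hmax : dmax d (x :: t) = dmax (x.2 - x.1) t := by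
          show dmax (max d (x.2 - x.1)) t = _
          rw [max_eq_right (le_of_lt hx)]
        by_cases h2 : ∀ y ∈ t, y.2 - y.1 ≤ x.2 - x.1
        · rw [if_pos h2]
          have hdm : dmax d (x :: t) = x.2 - x.1 := by rw [hmax]; exact dmax_eq_of_forall h2
          rw [List.find?_cons_of_pos (by simp [hdm])]
        · rw [if_neg h2]
          have hlt : x.2 - x.1 < dmax (x.2 - x.1) t := by
            push_neg at h2
            obtain ⟨y, hy, hly⟩ := h2
            exact lt_of_lt_of_le hly (diff_le_dmax _ hy)
          have hne : ¬ (x.2 - x.1 = dmax d (x :: t)) := by rw [hmax]; omega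
          rw [List.find?_cons_of_neg (by simpa using hne), hmax]
          have hsome : (t.find? (fun z => decide (z.2 - z.1 = dmax (x.2 - x.1) t))).isSome := by
            rcases dmax_eq_or (x.2 - x.1) t with h | ⟨z, hz, h⟩
            · omega
            · exact List.find?_isSome.mpr ⟨z, hz, by simp [h]⟩
          rcases hf : t.find? (fun z => decide (z.2 - z.1 = dmax (x.2 - x.1) t)) with _ | z
          · rw [hf] at hsome; simp at hsome
          · rw [hf]
      · rw [show dstep (s, e, d) x = (s, e, d) from by simp [dstep, hx], ih s e d]
        have hxle : x.2 - x.1 ≤ d := not_lt.mp hx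
        have hmax : dmax d (x :: t) = dmax d t := by
          show dmax (max d (x.2 - x.1)) t = _
          rw [max_eq_left hxle]
        have hviol : ∃ y ∈ t, d < y.2 - y.1 := by
          push_neg at hall
          obtain ⟨y, hy, hly⟩ := hall
          rcases List.mem_cons.mp hy with rfl | hyt
          · omega
          · exact ⟨y, hyt, hly⟩
        obtain ⟨y, hyt, hly⟩ := hviol
        have hdgt : d < dmax d t := lt_of_lt_of_le hly (diff_le_dmax d hyt)
        rw [if_neg (fun h => by have := h y hyt; omega)]
        rw [List.find?_cons_of_neg (by simp; omega), hmax]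

-- ===== B's loop, split into dict evolution and the pure dstep fold =====

def bstepF (acc : PySem.Dict (Int × Int) Int × Option Int × Option Int × Int)
    (ip : Int × (Int × Int)) : PySem.Dict (Int × Int) Int × Option Int × Option Int × Int :=
  match acc.1.get? ip.2 with
  | none => (acc.1.insert ip.2 ip.1, acc.2)
  | some f => if acc.2.2.2 < ip.1 - f then (acc.1, some f, some ip.1, ip.1 - f) else acc

def pbd (d : PySem.Dict (Int × Int) Int) : List (Int × (Int × Int)) → PySem.Dict (Int × Int) Int
  | [] => d
  | q :: t =>
    match d.get? q.2 with
    | none => pbd (d.insert q.2 q.1) t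
    | some _ => pbd d t

def pbs (d : PySem.Dict (Int × Int) Int) : List (Int × (Int × Int)) → List (Int × Int)
  | [] => []
  | q :: t =>
    match d.get? q.2 with
    | none => pbs (d.insert q.2 q.1) t
    | some f => (f, q.1) :: pbs d t

theorem bfold_split (l : List (Int × (Int × Int))) (d : PySem.Dict (Int × Int) Int)
    (st : Option Int × Option Int × Int) :
    l.foldl bstepF (d, st) = (pbd d l, (pbs d l).foldl dstep st) := by
  induction l generalizing d st with
  | nil => rfl
  | cons q t ih =>
    rw [List.foldl_cons]
    rcases hget : d.get? q.2 with _ | f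
    · have h1 : bstepF (d, st) q = (d.insert q.2 q.1, st) := by unfold bstepF; rw [hget]
      have h2 : pbd d (q :: t) = pbd (d.insert q.2 q.1) t := by simp [pbd, hget]
      have h3 : pbs d (q :: t) = pbs (d.insert q.2 q.1) t := by simp [pbs, hget]
      rw [h1, ih, h2, h3]
    · have h1 : bstepF (d, st) q = (d, dstep st (f, q.1)) := by
        unfold bstepF dstep
        rw [hget]
        by_cases h : st.2.2 < q.1 - f <;> simp [h]
      have h2 : pbd d (q :: t) = pbd d t := by simp [pbd, hget]
      have h3 : pbs d (q :: t) = (f, q.1) :: pbs d t := by simp [pbs, hget]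
      rw [h1, ih, h2, h3, List.foldl_cons]

-- ===== occurrence indices of a position in an enumerated list =====

def occE (e : List (Int × (Int × Int))) (p : Int × Int) : List Int :=
  (e.filter (fun q => q.2 == p)).map (·.1)

def firstE (e : List (Int × (Int × Int))) (p : Int × Int) : Int := (occE e p).headD 0

def lastE (e : List (Int × (Int × Int))) (p : Int × Int) : Int := (occE e p).getLastD 0

def PB (e : List (Int × (Int × Int))) : List (Int × Int) :=
  e.filterMap (fun q => if firstE e q.2 = q.1 then none else some (firstE e q.2, q.1))

def PA (e : List (Int × (Int × Int))) : List (Int × Int) :=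
  (PySem.List.dedup (e.map (·.2))).map (fun p => (firstE e p, lastE e p))

theorem mem_occE {e : List (Int × (Int × Int))} {p : Int × Int} {j : Int} :
    j ∈ occE e p ↔ (j, p) ∈ e := by
  simp only [occE, List.mem_map, List.mem_filter, beq_iff_eq]
  constructor
  · rintro ⟨q, ⟨hq, h2⟩, h1⟩; cases q; subst h1; subst h2; exact hq
  · intro h; exact ⟨(j, p), ⟨h, rfl⟩, rfl⟩

theorem occE_pairwise {e : List (Int × (Int × Int))}
    (hE : e.Pairwise (fun a b => a.1 < b.1)) (p : Int × Int) :
    (occE e p).Pairwise (· < ·) :=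
  (List.pairwise_map).mpr (hE.sublist List.filter_sublist)

theorem occE_ne_nil {e : List (Int × (Int × Int))} {p : Int × Int}
    (hp : p ∈ e.map (·.2)) : occE e p ≠ [] := by
  rcases List.mem_map.mp hp with ⟨q, hq, h2⟩
  have : q.1 ∈ occE e p := mem_occE.mpr (by cases q; cases h2; exact hq)
  exact fun hnil => by simp [hnil] at this

theorem headD_mem {l : List Int} (h : l ≠ []) : l.headD 0 ∈ l := by
  cases l with
  | nil => exact absurd rfl h
  | cons a t => simp

theorem getLastD_mem {l : List Int} (h : l ≠ []) : l.getLastD 0 ∈ l := by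
  rcases List.eq_nil_or_concat l with rfl | ⟨t, a, rfl⟩
  · exact absurd rfl h
  · simp

theorem pairwise_headD_le {l : List Int} (hl : l.Pairwise (· < ·)) :
    ∀ j ∈ l, l.headD 0 ≤ j := by
  cases l with
  | nil => intro j hj; cases hj
  | cons a t =>
    intro j hj
    rcases List.mem_cons.mp hj with rfl | hj
    · simp
    · exact le_of_lt ((List.pairwise_cons.mp hl).1 j hj)

theorem pairwise_le_getLastD {l : List Int} (hl : l.Pairwise (· < ·)) :
    ∀ j ∈ l, j ≤ l.getLastD 0 := by
  rcases eq_or_ne l [] with rfl | h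
  · intro j hj; cases hj
  · rcases List.eq_nil_or_concat l with rfl | ⟨t, a, rfl⟩
    · exact absurd rfl h
    intro j hj
    rw [List.concat_eq_append] at hl hj ⊢
    rw [List.getLastD_concat]
    rcases List.mem_append.mp hj with hj | hj
    · exact le_of_lt ((List.pairwise_append.mp hl).2.2 j hj a (by simp))
    · simp at hj; simp [hj]

theorem firstE_mem {e : List (Int × (Int × Int))} {p : Int × Int}
    (hp : p ∈ e.map (·.2)) : (firstE e p, p) ∈ e :=
  mem_occE.mp (headD_mem (occE_ne_nil hp))

theorem lastE_mem {e : List (Int × (Int × Int))} {p : Int × Int}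
    (hp : p ∈ e.map (·.2)) : (lastE e p, p) ∈ e :=
  mem_occE.mp (getLastD_mem (occE_ne_nil hp))

theorem firstE_le {e : List (Int × (Int × Int))} (hE : e.Pairwise (fun a b => a.1 < b.1))
    {p : Int × Int} {j : Int} (hj : (j, p) ∈ e) : firstE e p ≤ j :=
  pairwise_headD_le (occE_pairwise hE p) j (mem_occE.mpr hj)

theorem le_lastE {e : List (Int × (Int × Int))} (hE : e.Pairwise (fun a b => a.1 < b.1))
    {p : Int × Int} {j : Int} (hj : (j, p) ∈ e) : j ≤ lastE e p :=
  pairwise_le_getLastD (occE_pairwise hE p) j (mem_occE.mpr hj)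

-- B's dict/emission invariant: starting from a dict that answers "first index in the
-- whole list" exactly for the positions of the prefix, pbs emits PB of the suffix.
theorem pbs_inv :
    ∀ (suf pre : List (Int × (Int × Int))) (d : PySem.Dict (Int × Int) Int),
      (pre ++ suf).Pairwise (fun a b => a.1 < b.1) →
      (∀ p, p ∈ pre.map (·.2) → d.get? p = some (firstE (pre ++ suf) p)) →
      (∀ p, p ∉ pre.map (·.2) → d.get? p = none) →
      pbs d suf =
        suf.filterMap (fun q => if firstE (pre ++ suf) q.2 = q.1 then none
          else some (firstE (pre ++ suf) q.2, q.1)) := by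
  intro suf
  induction suf with
  | nil => intro pre d hE h1 h2; rfl
  | cons q t ih =>
    intro pre d hE h1 h2
    have hassoc : (pre ++ [q]) ++ t = pre ++ q :: t := by simp
    have hq_e : (q.1, q.2) ∈ pre ++ q :: t := List.mem_append_right _ (by simp)
    by_cases hp : q.2 ∈ pre.map (·.2)
    · have hget := h1 q.2 hp
      rcases List.mem_map.mp hp with ⟨r, hr, hr2⟩
      obtain ⟨r1, r2⟩ := r
      cases hr2
      have hrlt : r1 < q.1 := by
        have hpa := List.pairwise_append.mp hE
        exact hpa.2.2 (r1, q.2) hr q (by simp)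
      have hre : (r1, q.2) ∈ pre ++ q :: t := List.mem_append_left _ hr
      have hfle : firstE (pre ++ q :: t) q.2 ≤ r1 := firstE_le hE hre
      have hne : ¬ (firstE (pre ++ q :: t) q.2 = q.1) := by omega
      rw [show pbs d (q :: t) = (firstE (pre ++ q :: t) q.2, q.1) :: pbs d t from by
        simp [pbs, hget]]
      rw [show List.filterMap
            (fun q' => if firstE (pre ++ q :: t) q'.2 = q'.1 then none
              else some (firstE (pre ++ q :: t) q'.2, q'.1)) (q :: t)
          = (firstE (pre ++ q :: t) q.2, q.1) :: List.filterMap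
            (fun q' => if firstE (pre ++ q :: t) q'.2 = q'.1 then none
              else some (firstE (pre ++ q :: t) q'.2, q'.1)) t from by
        rw [List.filterMap_cons]; simp [hne]]
      congr 1
      have := ih (pre ++ [q]) d (by rw [hassoc]; exact hE) ?_ ?_
      · rw [hassoc] at this; exact this
      · intro p hp'
        rw [List.map_append] at hp'
        rw [hassoc]
        rcases List.mem_append.mp hp' with h | h
        · exact h1 p h
        · simp at h; subst h; exact hget
      · intro p hp'
        rw [List.map_append] at hp'
        exact h2 p (fun hc => hp' (List.mem_append.mpr (Or.inl hc)))
    · have hget := h2 q.2 hp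
      have h1st : firstE (pre ++ q :: t) q.2 = q.1 := by
        have hle : firstE (pre ++ q :: t) q.2 ≤ q.1 := firstE_le hE hq_e
        have hmem : (firstE (pre ++ q :: t) q.2, q.2) ∈ pre ++ q :: t :=
          firstE_mem (List.mem_map.mpr ⟨(q.1, q.2), hq_e, rfl⟩)
        rcases List.mem_append.mp hmem with h | h
        · exact absurd (List.mem_map.mpr ⟨_, h, rfl⟩) hp
        · rcases List.mem_cons.mp h with h | h
          · exact congrArg Prod.fst h
          · have hpa := List.pairwise_append.mp hE
            have hlt : q.1 < firstE (pre ++ q :: t) q.2 :=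
              (List.pairwise_cons.mp hpa.2.1).1 _ h
            omega
      rw [show pbs d (q :: t) = pbs (d.insert q.2 q.1) t from by simp [pbs, hget]]
      rw [show List.filterMap
            (fun q' => if firstE (pre ++ q :: t) q'.2 = q'.1 then none
              else some (firstE (pre ++ q :: t) q'.2, q'.1)) (q :: t)
          = List.filterMap
            (fun q' => if firstE (pre ++ q :: t) q'.2 = q'.1 then none
              else some (firstE (pre ++ q :: t) q'.2, q'.1)) t from by
        rw [List.filterMap_cons]; simp [h1st]]
      have := ih (pre ++ [q]) (d.insert q.2 q.1) (by rw [hassoc]; exact hE) ?_ ?_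
      · rw [hassoc] at this; exact this
      · intro p hp'
        rw [List.map_append] at hp'
        rw [hassoc]
        rcases List.mem_append.mp hp' with h | h
        · have hne2 : p ≠ q.2 := fun hc => hp (hc ▸ h)
          rw [PySem.Dict.get?_insert_of_ne _ _ hne2]
          exact h1 p h
        · simp at h; subst h
          rw [PySem.Dict.get?_insert_self, h1st]
      · intro p hp'
        rw [List.map_append] at hp'
        have hnp : p ∉ pre.map (·.2) := fun hc => hp' (List.mem_append.mpr (Or.inl hc))
        have hne2 : p ≠ q.2 := fun hc => hp' (List.mem_append.mpr (Or.inr (by simp [hc])))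
        rw [PySem.Dict.get?_insert_of_ne _ _ hne2]
        exact h2 p hnp

theorem pbs_empty (e : List (Int × (Int × Int))) (hE : e.Pairwise (fun a b => a.1 < b.1)) :
    pbs PySem.Dict.empty e = PB e := by
  have := pbs_inv e [] PySem.Dict.empty (by simpa using hE)
    (by intro p hp; cases hp) (by intro p _; exact PySem.Dict.get?_empty _)
  simpa [PB] using this

-- ===== A's dict characterization =====

theorem posmap_eq (e : List (Int × (Int × Int))) :
    (e.foldl
      (fun (m : PySem.Dict (Int × Int) (List Int)) ip =>
        if m.contains ip.2 then m.modify ip.2 [] (· ++ [ip.1]) else m.insert ip.2 [ip.1])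
      PySem.Dict.empty)
    = e.foldl (fun m ip => m.modify ip.2 [] (· ++ [ip.1])) PySem.Dict.empty := by
  refine PySem.List.foldl_congr_mem _ _ _ _ ?_
  intro m ip _
  by_cases h : m.contains ip.2 = true
  · simp [h]
  · have hb : m.contains ip.2 = false := by simpa using h
    rw [if_neg (by simp [hb])]
    rw [show m.modify ip.2 [] (· ++ [ip.1]) = m.insert ip.2 (m.getD ip.2 [] ++ [ip.1]) from rfl]
    rw [PySem.Dict.getD_of_not_contains m [] hb]
    rfl

theorem posmap_getD (e : List (Int × (Int × Int))) (p : Int × Int) :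
    (e.foldl (fun (m : PySem.Dict (Int × Int) (List Int)) ip => m.modify ip.2 [] (· ++ [ip.1]))
      PySem.Dict.empty).getD p [] = occE e p := by
  have h : (e.foldl (fun (m : PySem.Dict (Int × Int) (List Int)) ip => m.modify ip.2 [] (· ++ [ip.1])) PySem.Dict.empty)
      = ((e.map (fun q => (q.2, q.1))).foldl
          (fun (m : PySem.Dict (Int × Int) (List Int)) pr => m.modify pr.1 [] (· ++ [pr.2]))
          PySem.Dict.empty) := by
    rw [List.foldl_map]
  rw [h, PySem.Dict.getD_foldl_modify_append]
  simp only [PySem.Dict.getD_empty, List.nil_append, List.filter_map, List.map_map, occE]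
  rfl

theorem posmap_keys (e : List (Int × (Int × Int))) :
    (e.foldl (fun (m : PySem.Dict (Int × Int) (List Int)) ip => m.modify ip.2 [] (· ++ [ip.1]))
      PySem.Dict.empty).keys = PySem.List.dedup (e.map (·.2)) := by
  rw [PySem.Dict.keys_foldl_modify_key e (fun ip => ip.2) [] (fun _ ip => (· ++ [ip.1])) PySem.Dict.empty]
  simp [PySem.Dict.keys_empty, PySem.Set.update_nil_left, PySem.List.dedup_eq_ofList]

theorem posmap_items (e : List (Int × (Int × Int))) :
    (e.foldl (fun (m : PySem.Dict (Int × Int) (List Int)) ip => m.modify ip.2 [] (· ++ [ip.1]))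
      PySem.Dict.empty).items
    = (PySem.List.dedup (e.map (·.2))).map (fun p => (p, occE e p)) := by
  have hnd : (e.foldl (fun (m : PySem.Dict (Int × Int) (List Int)) ip => m.modify ip.2 [] (· ++ [ip.1]))
      PySem.Dict.empty).keys.Nodup := by
    rw [posmap_keys]; exact PySem.List.nodup_dedup _
  rw [PySem.Dict.items_eq_map_keys _ hnd [], posmap_keys]
  exact List.map_congr_left (fun p hp => by rw [posmap_getD])

-- ===== combinatorics: PB and PA have the same strict-max fold =====

theorem mem_PB {e : List (Int × (Int × Int))} {x : Int × Int} :
    x ∈ PB e ↔ ∃ q ∈ e, firstE e q.2 ≠ q.1 ∧ x = (firstE e q.2, q.1) := by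
  simp only [PB, List.mem_filterMap]
  constructor
  · rintro ⟨q, hq, hx⟩
    by_cases h : firstE e q.2 = q.1
    · simp [h] at hx
    · simp only [if_neg h, Option.some.injEq] at hx
      exact ⟨q, hq, h, hx.symm⟩
  · rintro ⟨q, hq, h, rfl⟩
    exact ⟨q, hq, by simp [h]⟩

theorem mem_PA {e : List (Int × (Int × Int))} {x : Int × Int} :
    x ∈ PA e ↔ ∃ p ∈ e.map (·.2), x = (firstE e p, lastE e p) := by
  simp only [PA, List.mem_map, PySem.List.mem_dedup]
  constructor
  · rintro ⟨p, hp, rfl⟩; exact ⟨p, hp, rfl⟩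
  · rintro ⟨p, hp, rfl⟩; exact ⟨p, hp, rfl⟩

theorem PA_mem_PB {e : List (Int × (Int × Int))} (hE : e.Pairwise (fun a b => a.1 < b.1))
    {x : Int × Int} (hx : x ∈ PA e) (hd : 0 < x.2 - x.1) : x ∈ PB e := by
  rcases mem_PA.mp hx with ⟨p, hp, rfl⟩
  have hne : firstE e p ≠ lastE e p := by simp at hd; omega
  exact mem_PB.mpr ⟨(lastE e p, p), lastE_mem hp, hne, rfl⟩

theorem PB_diff_le {e : List (Int × (Int × Int))} (hE : e.Pairwise (fun a b => a.1 < b.1))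
    {x : Int × Int} (hx : x ∈ PB e) :
    ∃ y ∈ PA e, x.1 = y.1 ∧ x.2 ≤ y.2 := by
  rcases mem_PB.mp hx with ⟨q, hq, hne, rfl⟩
  have hpm : q.2 ∈ e.map (·.2) := List.mem_map.mpr ⟨q, hq, rfl⟩
  exact ⟨(firstE e q.2, lastE e q.2), mem_PA.mpr ⟨q.2, hpm, rfl⟩, rfl, le_lastE hE hq⟩

theorem dmax_PB_PA (e : List (Int × (Int × Int))) (hE : e.Pairwise (fun a b => a.1 < b.1)) :
    dmax 0 (PB e) = dmax 0 (PA e) := by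
  apply le_antisymm
  · rcases dmax_eq_or 0 (PB e) with h | ⟨x, hx, h⟩
    · rw [h]; exact le_dmax 0 (PA e)
    · rcases PB_diff_le hE hx with ⟨y, hy, h1, h2⟩
      have := diff_le_dmax 0 hy
      omega
  · rcases dmax_eq_or 0 (PA e) with h | ⟨y, hy, h⟩
    · rw [h]; exact le_dmax 0 (PB e)
    · by_cases hpos : 0 < y.2 - y.1
      · have := diff_le_dmax 0 (PA_mem_PB hE hy hpos)
        omega
      · have := le_dmax 0 (PB e); omega

theorem cond_PB_PA (e : List (Int × (Int × Int))) (hE : e.Pairwise (fun a b => a.1 < b.1)) :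
    (∀ x ∈ PB e, x.2 - x.1 ≤ 0) ↔ (∀ x ∈ PA e, x.2 - x.1 ≤ 0) := by
  constructor
  · intro hB x hx
    by_cases hpos : 0 < x.2 - x.1
    · have := hB x (PA_mem_PB hE hx hpos); omega
    · omega
  · intro hA x hx
    rcases PB_diff_le hE hx with ⟨y, hy, h1, h2⟩
    have := hA y hy; omega

theorem att_PB_PA {e : List (Int × (Int × Int))} (hE : e.Pairwise (fun a b => a.1 < b.1))
    {M : Int} (hM : 0 < M) (hMd : M = dmax 0 (PA e)) (x : Int × Int) :
    (x ∈ PB e ∧ x.2 - x.1 = M) ↔ (x ∈ PA e ∧ x.2 - x.1 = M) := by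
  constructor
  · rintro ⟨hxB, hdiff⟩
    refine ⟨?_, hdiff⟩
    rcases mem_PB.mp hxB with ⟨q, hq, hne, rfl⟩
    have hqe : (q.1, q.2) ∈ e := hq
    have hle : q.1 ≤ lastE e q.2 := le_lastE hE hqe
    have hpm : q.2 ∈ e.map (·.2) := List.mem_map.mpr ⟨q, hq, rfl⟩
    rcases lt_or_eq_of_le hle with hlt | heq
    · exfalso
      have hy : (firstE e q.2, lastE e q.2) ∈ PA e := mem_PA.mpr ⟨q.2, hpm, rfl⟩
      have hb := diff_le_dmax 0 hy
      simp only at hb hdiff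
      rw [← hMd] at hb
      omega
    · exact mem_PA.mpr ⟨q.2, hpm, by rw [heq]⟩
  · rintro ⟨hxA, hdiff⟩
    exact ⟨PA_mem_PB hE hxA (by omega), hdiff⟩

theorem PB_sorted (e : List (Int × (Int × Int))) (hE : e.Pairwise (fun a b => a.1 < b.1)) :
    (PB e).Pairwise (fun a b => a.2 < b.2) := by
  refine List.pairwise_filterMap.mpr (hE.imp ?_)
  intro a b hab x hx y hy
  by_cases ha : firstE e a.2 = a.1
  · simp [ha] at hx
  · by_cases hb : firstE e b.2 = b.1
    · simp [hb] at hy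
    · simp only [if_neg ha, Option.some.injEq] at hx
      simp only [if_neg hb, Option.some.injEq] at hy
      rw [← hx, ← hy]
      exact hab

theorem occE_cons_self (q : Int × (Int × Int)) (t : List (Int × (Int × Int))) :
    occE (q :: t) q.2 = q.1 :: occE t q.2 := by
  simp [occE, List.filter_cons]

theorem occE_cons_ne {q : Int × (Int × Int)} {t : List (Int × (Int × Int))} {p : Int × Int}
    (h : p ≠ q.2) : occE (q :: t) p = occE t p := by
  simp [occE, List.filter_cons, (by simpa using h.symm : ¬ (q.2 = p))]

theorem dedup_pairwise_firstE :
    ∀ (e : List (Int × (Int × Int))), e.Pairwise (fun a b => a.1 < b.1) →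
    (PySem.List.dedup (e.map (·.2))).Pairwise (fun a b => firstE e a < firstE e b) := by
  intro e hE
  induction e with
  | nil => simp [PySem.List.dedup_eq_ofList, PySem.Set.ofList_nil]
  | cons q t ih =>
    have hpc := List.pairwise_cons.mp hE
    rw [List.map_cons, PySem.List.dedup_eq_ofList, PySem.Set.ofList_cons]
    refine List.pairwise_cons.mpr ⟨?_, ?_⟩
    · intro b hb
      obtain ⟨hbS, hbne⟩ := (PySem.Set.mem_discard _ _ _).mp hb
      have hbmem : b ∈ t.map (·.2) := by
        simpa [PySem.List.dedup_eq_ofList] using (PySem.Set.mem_ofList _ _).mp hbS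
      rw [show firstE (q :: t) q.2 = q.1 from by simp [firstE, occE_cons_self]]
      rw [show firstE (q :: t) b = firstE t b from by simp [firstE, occE_cons_ne hbne]]
      exact hpc.1 _ (firstE_mem hbmem)
    · have ihp := ih hpc.2
      rw [PySem.List.dedup_eq_ofList] at ihp
      have hsub : ((PySem.Set.ofList (t.map (·.2))).discard q.2).Sublist
          (PySem.Set.ofList (t.map (·.2))) := by
        rw [show (PySem.Set.ofList (t.map (·.2))).discard q.2
            = (PySem.Set.ofList (t.map (·.2))).filter (fun y => !(y == q.2)) from rfl]
        exact List.filter_sublist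
      refine (ihp.sublist hsub).imp_of_mem ?_
      intro a b ha hb hR
      have ha2 := ((PySem.Set.mem_discard _ _ _).mp ha).2
      have hb2 := ((PySem.Set.mem_discard _ _ _).mp hb).2
      rw [show firstE (q :: t) a = firstE t a from by simp [firstE, occE_cons_ne ha2]]
      rw [show firstE (q :: t) b = firstE t b from by simp [firstE, occE_cons_ne hb2]]
      exact hR

theorem PA_sorted (e : List (Int × (Int × Int))) (hE : e.Pairwise (fun a b => a.1 < b.1)) :
    (PA e).Pairwise (fun a b => a.1 < b.1) :=
  (List.pairwise_map).mpr (dedup_pairwise_firstE e hE)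

theorem find?_sorted_min {α : Type} (key : α → Int) {L : List α} {P : α → Bool}
    (hs : L.Pairwise (fun a b => key a < key b)) {x : α} (hx : x ∈ L) (hPx : P x = true)
    (hmin : ∀ z ∈ L, P z = true → key x ≤ key z) : L.find? P = some x := by
  induction L with
  | nil => cases hx
  | cons a t ih =>
    rcases List.mem_cons.mp hx with rfl | hxt
    · exact List.find?_cons_of_pos hPx
    · by_cases hPa : P a = true
      · have h1 : key x ≤ key a := hmin a (by simp) hPa
        have h2 : key a < key x := (List.pairwise_cons.mp hs).1 x hxt
        exact absurd h2 (not_lt.mpr h1)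
      · rw [List.find?_cons_of_neg hPa]
        exact ih (List.pairwise_cons.mp hs).2 hxt (fun z hz hPz => hmin z (by simp [hz]) hPz)

theorem find?_min_of_sorted {α : Type} (key : α → Int) {L : List α} {P : α → Bool}
    (hs : L.Pairwise (fun a b => key a < key b)) {x : α} (h : L.find? P = some x) :
    x ∈ L ∧ P x = true ∧ ∀ z ∈ L, P z = true → key x ≤ key z := by
  obtain ⟨hPx, as, bs, heq, hprev⟩ := List.find?_eq_some_iff_append.mp h
  subst heq
  refine ⟨by simp, hPx, ?_⟩
  intro z hz hPz
  rcases List.mem_append.mp hz with hzas | hzxbs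
  · exact absurd hPz (by simpa using hprev z hzas)
  · rcases List.mem_cons.mp hzxbs with rfl | hzbs
    · exact le_refl _
    · have hpw := (List.pairwise_append.mp hs).2.1
      exact le_of_lt ((List.pairwise_cons.mp hpw).1 z hzbs)

theorem find?_PB_PA (e : List (Int × (Int × Int))) (hE : e.Pairwise (fun a b => a.1 < b.1))
    {M : Int} (hM : 0 < M) (hMd : M = dmax 0 (PA e)) :
    (PB e).find? (fun x => decide (x.2 - x.1 = M)) =
    (PA e).find? (fun x => decide (x.2 - x.1 = M)) := by
  have hMne : dmax 0 (PA e) ≠ 0 := by rw [← hMd]; omega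
  rcases dmax_eq_or 0 (PA e) with h | ⟨y0, hy0, hatt⟩
  · exact absurd h hMne
  have hP0 : decide (y0.2 - y0.1 = M) = true := by
    simp only [decide_eq_true_eq]; omega
  have hsome : ((PA e).find? (fun x => decide (x.2 - x.1 = M))).isSome = true :=
    List.find?_isSome.mpr ⟨y0, hy0, hP0⟩
  rcases hfa : (PA e).find? (fun x => decide (x.2 - x.1 = M)) with _ | y
  · rw [hfa] at hsome; simp at hsome
  obtain ⟨hyPA, hPy, hymin⟩ := find?_min_of_sorted (fun x : Int × Int => x.1) (PA_sorted e hE) hfa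
  have hyM : y.2 - y.1 = M := by simpa using hPy
  have hyPB := (att_PB_PA hE hM hMd y).mpr ⟨hyPA, hyM⟩
  rw [hfa]
  refine find?_sorted_min (P := fun x : Int × Int => decide (x.2 - x.1 = M))
    (fun x : Int × Int => x.2) (PB_sorted e hE) hyPB.1 (by exact hPy) ?_
  intro z hz hPz
  have hzM : z.2 - z.1 = M := by simpa using hPz
  have hzPA := (att_PB_PA hE hM hMd z).mp ⟨hz, hzM⟩
  have h1 : y.1 ≤ z.1 := hymin z hzPA.1 hPz
  show y.2 ≤ z.2
  omega

theorem states_eq (e : List (Int × (Int × Int))) (hE : e.Pairwise (fun a b => a.1 < b.1)) :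
    (PB e).foldl dstep (none, none, 0) = (PA e).foldl dstep (none, none, 0) := by
  rw [foldl_dstep_char, foldl_dstep_char]
  by_cases hc : ∀ x ∈ PA e, x.2 - x.1 ≤ 0
  · rw [if_pos ((cond_PB_PA e hE).mpr hc), if_pos hc]
  · rw [if_neg hc, if_neg (fun h => hc ((cond_PB_PA e hE).mp h))]
    have hM : 0 < dmax 0 (PA e) := by
      push_neg at hc
      obtain ⟨y, hy, h⟩ := hc
      exact lt_of_lt_of_le h (diff_le_dmax 0 hy)
    rw [dmax_PB_PA e hE, find?_PB_PA e hE hM rfl]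

-- ===== assembling the two ports =====

def finish (path : List (Int × Int)) (st : Option Int × Option Int × Int) :
    Option (List (Int × Int)) :=
  match st.1, st.2.1 with
  | some cs, some ce =>
      some (PySem.List.slice path none (some cs) ++ PySem.List.slice path (some ce) none)
  | _, _ => none

def finishB (path : List (Int × Int)) (st : Option Int × Option Int × Int) :
    Option (List (Int × Int)) :=
  match st.1 with
  | some cs =>
    match st.2.1 with
    | some ce =>
        some (PySem.List.slice path none (some cs) ++ PySem.List.slice path (some ce) none)
    | none => none
  | none => none

theorem finishB_eq (path : List (Int × Int)) (st : Option Int × Option Int × Int) :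
    finishB path st = finish path st := by
  rcases st with ⟨a, b, c⟩
  rcases a <;> rcases b <;> rfl

def aBody (st : Option Int × Option Int × Int) (kv : (Int × Int) × List Int) :
    Option Int × Option Int × Int :=
  let diff := (PySem.List.pyGet? kv.2 (-1)).getD 0 - (PySem.List.pyGet? kv.2 0).getD 0
  if st.2.2 < diff then (PySem.List.pyGet? kv.2 0, PySem.List.pyGet? kv.2 (-1), diff) else st

theorem A_char (path : List (Int × Int)) :
    reduce_path path =
      if 0 < ((PySem.List.enumerate path 0).foldl
          (fun (m : PySem.Dict (Int × Int) (List Int)) ip =>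
            if m.contains ip.2 then m.modify ip.2 [] (· ++ [ip.1]) else m.insert ip.2 [ip.1])
          PySem.Dict.empty).size then
        finish path (((PySem.List.enumerate path 0).foldl
            (fun (m : PySem.Dict (Int × Int) (List Int)) ip =>
              if m.contains ip.2 then m.modify ip.2 [] (· ++ [ip.1]) else m.insert ip.2 [ip.1])
            PySem.Dict.empty).items.foldl aBody (none, none, 0))
      else none := rfl

theorem B_char (path : List (Int × Int)) :
    reduce_path_alt path =
      finishB path (((PySem.List.enumerate path 0).foldl bstepF
        (PySem.Dict.empty, none, none, 0)).2) := rfl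

theorem dict_size_eq (d : PySem.Dict (Int × Int) (List Int)) :
    d.size = d.items.length := rfl

theorem pyGet?_zero_ne_nil {l : List Int} (h : l ≠ []) :
    PySem.List.pyGet? l 0 = some (l.headD 0) := by
  cases l with
  | nil => exact absurd rfl h
  | cons a t => rw [PySem.List.pyGet?_zero]; rfl

theorem pyGet?_neg_one_ne_nil {l : List Int} (h : l ≠ []) :
    PySem.List.pyGet? l (-1) = some (l.getLastD 0) := by
  rcases List.eq_nil_or_concat l with rfl | ⟨t, a, rfl⟩
  · exact absurd rfl h
  · rw [List.concat_eq_append, PySem.List.pyGet?_neg_one_append_singleton, List.getLastD_concat]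

-- ===== VERDICT (by name: the statement is the Claim_ definition above) =====
theorem reduce_path_spec : Claim_equal_reduce_path := by
  intro path _
  unfold Spec_reduce_path
  by_cases hnil : path = []
  · subst hnil; decide
  · have hE := PySem.List.pairwise_lt_enumerate path 0
    rw [A_char, B_char, bfold_split]
    rw [show ((pbd PySem.Dict.empty (PySem.List.enumerate path 0),
          (pbs PySem.Dict.empty (PySem.List.enumerate path 0)).foldl dstep (none, none, 0))).2
        = (pbs PySem.Dict.empty (PySem.List.enumerate path 0)).foldl dstep (none, none, 0) from rfl]
    rw [pbs_empty _ hE, states_eq _ hE, finishB_eq]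
    rw [posmap_eq, dict_size_eq, posmap_items]
    have hlen : 0 < ((PySem.List.dedup ((PySem.List.enumerate path 0).map (·.2))).map
        (fun p => (p, occE (PySem.List.enumerate path 0) p))).length := by
      rw [List.length_map]
      obtain ⟨x, hx⟩ := List.exists_mem_of_ne_nil path hnil
      have hxd : x ∈ PySem.List.dedup ((PySem.List.enumerate path 0).map (·.2)) := by
        rw [PySem.List.map_snd_enumerate]
        exact (PySem.List.mem_dedup _ _).mpr hx
      exact List.length_pos_of_mem hxd
    rw [if_pos hlen]
    rw [PySem.List.foldl_congr_mem _ aBody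
      (fun st kv => dstep st (firstE (PySem.List.enumerate path 0) kv.1,
        lastE (PySem.List.enumerate path 0) kv.1)) (none, none, 0) ?_]
    · rw [show (PA (PySem.List.enumerate path 0))
          = (PySem.List.dedup ((PySem.List.enumerate path 0).map (·.2))).map
              (fun p => (firstE (PySem.List.enumerate path 0) p,
                lastE (PySem.List.enumerate path 0) p)) from rfl]
      rw [List.foldl_map, List.foldl_map]
    · intro acc kv hkv
      rcases List.mem_map.mp hkv with ⟨p, hp, rfl⟩
      have hpm : p ∈ (PySem.List.enumerate path 0).map (·.2) :=
        (PySem.List.mem_dedup _ _).mp hp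
      have hocc : occE (PySem.List.enumerate path 0) p ≠ [] := occE_ne_nil hpm
      unfold aBody
      rw [pyGet?_zero_ne_nil hocc, pyGet?_neg_one_ne_nil hocc]
      simp [dstep, firstE, lastE]
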